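-- pv_equiv track=rewrite | github.com/ezfuzzy/boj-or-dreamhack | boj/pyhton/n-tuple.py | solution
-- ===== SOURCE A (Python) =====
-- from collections import Counter
--
-- def solution(tuple):
--
--     answer = []
--     array = []
--     nowInt = ''
--
--     for i in range(len(tuple)):
--         if tuple[i] != '{' and tuple[i] != '}' and tuple[i] != ',':
--             nowInt += tuple[i]
--
--         elif tuple[i] == ',' or tuple[i-1] == tuple[i] and tuple[i] == '}':
--             array.append(nowInt)
--             nowInt = ''
--
--     temp = Counter(array)
--     sorted_temp = sorted(temp.items(), key = lambda item: item[1], reverse = True)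
--     for i in sorted_temp:
--         answer.append(int(i[0]))
--
--     return answer
-- ===== SOURCE B (Python) =====
-- def solution(tuple):
--     # Parse by cutting the string at separator positions (commas and the second
--     # brace of a "}}" pair), then strip braces from each cut segment by filtering.
--     tokens = []
--     prev = 0
--     for i, ch in enumerate(tuple):
--         if ch == ',' or (ch == '}' and tuple[i - 1] == '}'):
--             tokens.append(''.join(c for c in tuple[prev:i] if c != '{' and c != '}'))
--             prev = i + 1
--     # Count in first-appearance order.
--     counts = {}
--     for t in tokens:
--         counts[t] = counts.get(t, 0) + 1
--     if not counts:
--         return []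
--     # Bucket the distinct elements by their count, then emit counts downward:
--     # a counting sort that reproduces the stable reverse sort.
--     maxc = max(counts.values())
--     buckets = {}
--     for t, c in counts.items():
--         buckets.setdefault(c, []).append(int(t))
--     out = []
--     for c in range(maxc, 0, -1):
--         out += buckets.get(c, [])
--     return out
-- ===== Notes on version B (the rewrite author's own statement) =====
-- stated objective: alternative
-- what changed: Parsing now cuts the string at separator positions and strips braces from each slice (instead of char-by-char accumulation into a growing token), and the frequency ordering is a counting/bucket pass (a dict of count-buckets emitted from the maximal count downward) instead of Counter + stable reverse comparison sort.
import Mathlib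
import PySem

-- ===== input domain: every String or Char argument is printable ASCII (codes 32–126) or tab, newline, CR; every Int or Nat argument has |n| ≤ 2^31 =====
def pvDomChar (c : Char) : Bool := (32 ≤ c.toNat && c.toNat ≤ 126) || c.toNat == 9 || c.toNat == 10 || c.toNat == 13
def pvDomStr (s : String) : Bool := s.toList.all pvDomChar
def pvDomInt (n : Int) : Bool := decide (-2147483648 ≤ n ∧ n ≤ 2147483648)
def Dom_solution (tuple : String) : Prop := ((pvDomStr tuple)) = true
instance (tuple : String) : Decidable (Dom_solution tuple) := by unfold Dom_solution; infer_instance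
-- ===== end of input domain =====

-- B re-implements A by cutting the string at separator positions with slices (instead of
-- char-by-char accumulation) and by a counting/bucket pass over the frequencies (instead of
-- Counter + comparison sort); same return value wherever A returns.

-- ===== PORT A =====
-- the body of A's "for i in range(len(tuple))" loop (st = (array, nowInt))
def pvStepA (s : List Char) (st : List (List Char) × List Char) (i : Int) :
    List (List Char) × List Char :=
  let c := (PySem.List.pyGet? s i).getD ' '   -- i always in range, getD never used
  if c ≠ '{' ∧ c ≠ '}' ∧ c ≠ ',' then (st.1, st.2 ++ [c])
  else if c = ',' ∨ ((PySem.List.pyGet? s (i - 1)).getD ' ' = c ∧ c = '}') then (st.1 ++ [st.2], [])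
  else st

def solution (tuple : String) : List Int :=
  let s := tuple.toList
  let st := (PySem.List.pyRange 0 (s.length : Int) 1).foldl (pvStepA s) ([], [])
  let temp := PySem.Dict.counter st.1
  let sorted_temp := PySem.List.sorted temp.items (fun p => p.2) true
  -- int(i[0]): ofChars?; the 'none' (ValueError) case is excluded by Pre_solution
  sorted_temp.foldl (fun answer p => answer ++ [(PySem.Int.ofChars? p.1).getD 0]) []

-- ===== PORT B =====
-- c != '{' and c != '}'  (the brace filter of B's join)
def pvNB (c : Char) : Bool := !(c = '{') && !(c = '}')

-- the body of B's "for i, ch in enumerate(tuple)" loop (st = (tokens, prev))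
def pvStepB (s : List Char) (st : List (List Char) × Int) (p : Int × Char) :
    List (List Char) × Int :=
  if p.2 = ',' ∨ (p.2 = '}' ∧ (PySem.List.pyGet? s (p.1 - 1)).getD ' ' = '}') then
    (st.1 ++ [(PySem.List.slice s (some st.2) (some p.1)).filter pvNB], p.1 + 1)
  else st

def solution_alt (tuple : String) : List Int :=
  let s := tuple.toList
  let st := (PySem.List.enumerate s).foldl (pvStepB s) ([], 0)
  let counts := st.1.foldl (fun d t => d.insert t (d.getD t 0 + 1)) PySem.Dict.empty
  if counts.items = [] then []
  else
    let maxc := (PySem.List.max? counts.values (fun v => v)).getD 0  -- nonempty: getD unused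
    let buckets := counts.items.foldl
      (fun (d : PySem.Dict Int (List Int)) p =>
        d.modify p.2 [] (fun l => l ++ [(PySem.Int.ofChars? p.1).getD 0])) PySem.Dict.empty
    (PySem.List.pyRange maxc 0 (-1)).foldl (fun out c => out ++ buckets.getD c []) []

-- ===== PRECONDITION & SPEC =====
-- the token scan, for stating Pre_ (which tokens A feeds to int()); not used by either port
def pvScan : Char → List (List Char) → List Char → List Char → List (List Char) × List Char
  | _, acc, cur, [] => (acc, cur)
  | prev, acc, cur, c :: rest =>
    if c ≠ '{' ∧ c ≠ '}' ∧ c ≠ ',' then pvScan c acc (cur ++ [c]) rest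
    else if c = ',' ∨ (prev = c ∧ c = '}') then pvScan c (acc ++ [cur]) [] rest
    else pvScan c acc cur rest

def pvTokens (s : List Char) : List (List Char) :=
  (pvScan ((PySem.List.pyGet? s (-1)).getD ' ') [] [] s).1

-- Pre_ excludes exactly the inputs where A raises ValueError: some scanned element is not a
-- valid int() literal.
def Pre_solution (tuple : String) : Prop :=
  ∀ t ∈ pvTokens tuple.toList, PySem.Int.ofChars? t ≠ none
instance (tuple : String) : Decidable (Pre_solution tuple) := by unfold Pre_solution; infer_instance

def pvWitness_solution : String := "{{2},{2,1}}"

def Spec_solution (tuple : String) (out : List Int) : Prop := out = solution_alt tuple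
instance (tuple : String) (out : List Int) : Decidable (Spec_solution tuple out) := by unfold Spec_solution; infer_instance

-- ===== CLAIM (what is proved, stated in full; the proofs are below) =====
def Claim_equal_solution : Prop := ∀ (tuple : String), Dom_solution tuple → Pre_solution tuple → Spec_solution tuple (solution tuple)

-- ===== LEMMAS AND PROOFS =====

theorem insertBy_nil {α : Type} (b : α → α → Bool) (x : α) :
    PySem.List.insertBy b x [] = [x] := by simp [PySem.List.insertBy]

theorem insertBy_cons {α : Type} (b : α → α → Bool) (x y : α) (ys : List α) :
    PySem.List.insertBy b x (y :: ys)
      = if b x y then x :: y :: ys else y :: PySem.List.insertBy b x ys := by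
  simp [PySem.List.insertBy]

theorem insertBy_append_of_skip {α : Type} (b : α → α → Bool) (x : α) (as bs : List α)
    (h : ∀ y ∈ as, b x y = false) :
    PySem.List.insertBy b x (as ++ bs) = as ++ PySem.List.insertBy b x bs := by
  induction as with
  | nil => simp
  | cons a t ih =>
    rw [List.cons_append, insertBy_cons, if_neg]
    · rw [ih (fun y hy => h y (List.mem_cons_of_mem a hy))]; rfl
    · simp [h a List.mem_cons_self]

theorem insertBy_all_before {α : Type} (b : α → α → Bool) (x : α) (bs : List α)
    (h : ∀ y ∈ bs, b x y = true) :
    PySem.List.insertBy b x bs = x :: bs := by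
  cases bs with
  | nil => exact insertBy_nil b x
  | cons y ys => rw [insertBy_cons, if_pos (h y List.mem_cons_self)]

theorem flatMap_congr_mem {α β : Type} (l : List α) (f g : α → List β)
    (h : ∀ a ∈ l, f a = g a) : List.flatMap f l = List.flatMap g l := by
  induction l with
  | nil => rfl
  | cons a t ih =>
    rw [List.flatMap_cons, List.flatMap_cons, h a List.mem_cons_self,
        ih (fun a ha => h a (List.mem_cons_of_mem _ ha))]

theorem foldA (s : List Char) :
    ∀ (rest done : List Char) (acc : List (List Char)) (cur : List Char),
      s = done ++ rest →
      (PySem.List.pyRange (done.length : Int) (s.length : Int) 1).foldl (pvStepA s) (acc, cur)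
        = pvScan ((PySem.List.pyGet? s ((done.length : Int) - 1)).getD ' ') acc cur rest := by
  intro rest
  induction rest with
  | nil =>
    intro done acc cur h
    have hlen : s.length = done.length := by simp [h]
    have hnil : PySem.List.pyRange (done.length : Int) (s.length : Int) 1 = [] := by
      rw [hlen]; simp [PySem.List.pyRange]
    rw [hnil]; rfl
  | cons c rest ih =>
    intro done acc cur h
    have hlt : (done.length : Int) < (s.length : Int) := by
      subst h; simp
    have hget : PySem.List.pyGet? s ((done.length : Nat) : Int) = some c := by
      rw [PySem.List.pyGet?_natCast, h, List.getElem?_append_right (Nat.le_refl _)]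
      simp
    have hstep : ∀ st : List (List Char) × List Char,
        pvStepA s st ((done.length : Nat) : Int)
          = if c ≠ '{' ∧ c ≠ '}' ∧ c ≠ ',' then (st.1, st.2 ++ [c])
            else if c = ',' ∨ ((PySem.List.pyGet? s ((done.length : Int) - 1)).getD ' ' = c ∧ c = '}')
              then (st.1 ++ [st.2], [])
            else st := by
      intro st; simp only [pvStepA, hget, Option.getD_some]
    have hdone' : s = (done ++ [c]) ++ rest := by simp [h]
    have hlen' : (((done ++ [c]).length : Nat) : Int) = (done.length : Int) + 1 := by
      simp
    have hprev' : (PySem.List.pyGet? s ((done.length : Int) + 1 - 1)).getD ' ' = c := by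
      norm_num [hget]
    rw [PySem.List.pyRange_one_cons hlt, List.foldl_cons, hstep]
    have ih' := fun acc cur => ih (done ++ [c]) acc cur hdone'
    rw [hlen'] at ih'
    rw [hprev'] at ih'
    show _ = pvScan _ acc cur (c :: rest)
    rw [pvScan]
    split_ifs with h1 h2
    · exact ih' acc (cur ++ [c])
    · exact ih' (acc ++ [cur]) []
    · exact ih' acc cur

theorem slice_snoc (s : List Char) (p k : Nat) (c : Char) (hp : p ≤ k) (hk : s[k]? = some c) :
    PySem.List.slice s (some (p : Int)) (some ((k + 1 : Nat) : Int))
      = PySem.List.slice s (some (p : Int)) (some ((k : Nat) : Int)) ++ [c] := by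
  rw [PySem.List.slice_natCast, PySem.List.slice_natCast]
  have h1 : k + 1 - p = (k - p) + 1 := by omega
  rw [h1, List.take_add_one]
  have h2 : (s.drop p)[k - p]? = some c := by
    rw [List.getElem?_drop]
    have : p + (k - p) = k := by omega
    rw [this, hk]
  rw [h2]; rfl

theorem slice_empty (s : List Char) (k : Nat) :
    PySem.List.slice s (some (k : Int)) (some (k : Int)) = [] := by
  rw [PySem.List.slice_natCast]; simp

theorem foldB (s : List Char) :
    ∀ (rest done : List Char) (toks : List (List Char)) (p : Nat),
      s = done ++ rest → p ≤ done.length →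
      ((PySem.List.enumerate rest ((done.length : Nat) : Int)).foldl (pvStepB s) (toks, (p : Int))).1
        = (pvScan ((PySem.List.pyGet? s ((done.length : Int) - 1)).getD ' ') toks
            ((PySem.List.slice s (some (p : Int)) (some ((done.length : Nat) : Int))).filter pvNB) rest).1 := by
  intro rest
  induction rest with
  | nil => intro done toks p h hp; rfl
  | cons c rest ih =>
    intro done toks p h hp
    have hget : PySem.List.pyGet? s ((done.length : Nat) : Int) = some c := by
      rw [PySem.List.pyGet?_natCast, h, List.getElem?_append_right (Nat.le_refl _)]
      simp
    have hgetq : s[done.length]? = some c := by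
      rw [h, List.getElem?_append_right (Nat.le_refl _)]; simp
    have hdone' : s = (done ++ [c]) ++ rest := by simp [h]
    have hlen' : (((done ++ [c]).length : Nat) : Int) = (done.length : Int) + 1 := by
      simp
    have hlenn : (done ++ [c]).length = done.length + 1 := by simp
    have hprev' : (PySem.List.pyGet? s ((done.length : Int) + 1 - 1)).getD ' ' = c := by
      norm_num [hget]
    have henum : PySem.List.enumerate (c :: rest) ((done.length : Nat) : Int)
        = (((done.length : Nat) : Int), c) :: PySem.List.enumerate rest (((done.length : Nat) : Int) + 1) := by
      simp [PySem.List.enumerate]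
    have ih' := fun toks p hp => ih (done ++ [c]) toks p hdone' hp
    rw [hlen', hlenn] at ih'
    rw [hprev'] at ih'
    rw [henum, List.foldl_cons]
    rw [pvScan]
    simp only [pvStepB]
    by_cases hb : c = ',' ∨ (c = '}' ∧ (PySem.List.pyGet? s (((done.length : Nat) : Int) - 1)).getD ' ' = '}')
    · rw [if_pos hb]
      have h1 : ¬ (c ≠ '{' ∧ c ≠ '}' ∧ c ≠ ',') := by
        rcases hb with hb | hb
        · intro hh; exact hh.2.2 hb
        · intro hh; exact hh.2.1 hb.1
      have h2 : c = ',' ∨ ((PySem.List.pyGet? s ((done.length : Int) - 1)).getD ' ' = c ∧ c = '}') := by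
        rcases hb with hb | hb
        · exact Or.inl hb
        · exact Or.inr ⟨hb.1 ▸ hb.2, hb.1⟩
      rw [if_neg h1, if_pos h2]
      have hcast : ((done.length : Nat) : Int) + 1 = (((done.length + 1 : Nat)) : Int) := by push_cast; ring
      have := ih' (toks ++ [(PySem.List.slice s (some (p : Int)) (some ((done.length : Nat) : Int))).filter pvNB]) (done.length + 1) (Nat.le_refl _)
      rw [hcast] at this ⊢
      rw [slice_empty] at this
      simp only [List.filter_nil] at this
      exact this
    · rw [if_neg hb]
      by_cases h1 : c ≠ '{' ∧ c ≠ '}' ∧ c ≠ ','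
      · rw [if_pos h1]
        have hnb : pvNB c = true := by simp [pvNB, h1.1, h1.2.1]
        have hsl : (PySem.List.slice s (some (p : Int)) (some (((done.length + 1 : Nat)) : Int))).filter pvNB
            = (PySem.List.slice s (some (p : Int)) (some ((done.length : Nat) : Int))).filter pvNB ++ [c] := by
          rw [slice_snoc s p done.length c hp hgetq, List.filter_append]
          simp [hnb]
        have hcast : ((done.length : Nat) : Int) + 1 = (((done.length + 1 : Nat)) : Int) := by push_cast; ring
        have := ih' toks p (Nat.le_succ_of_le hp)
        rw [hcast] at this ⊢
        rw [hsl] at this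
        exact this
      · rw [if_neg h1]
        have h2 : ¬ (c = ',' ∨ ((PySem.List.pyGet? s ((done.length : Int) - 1)).getD ' ' = c ∧ c = '}')) := by
          intro hh
          apply hb
          rcases hh with hh | hh
          · exact Or.inl hh
          · exact Or.inr ⟨hh.2, hh.2 ▸ hh.1⟩
        rw [if_neg h2]
        have hcbrace : c = '{' ∨ c = '}' := by
          by_cases hbr : c = '{'
          · exact Or.inl hbr
          · by_cases hbr2 : c = '}'
            · exact Or.inr hbr2
            · exact absurd ⟨hbr, hbr2, fun hcomma => h2 (Or.inl hcomma)⟩ h1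
        have hnb : pvNB c = false := by
          rcases hcbrace with hc | hc <;> simp [pvNB, hc]
        have hsl : (PySem.List.slice s (some (p : Int)) (some (((done.length + 1 : Nat)) : Int))).filter pvNB
            = (PySem.List.slice s (some (p : Int)) (some ((done.length : Nat) : Int))).filter pvNB := by
          rw [slice_snoc s p done.length c hp hgetq, List.filter_append]
          simp [hnb]
        have hcast : ((done.length : Nat) : Int) + 1 = (((done.length + 1 : Nat)) : Int) := by push_cast; ring
        have := ih' toks p (Nat.le_succ_of_le hp)
        rw [hcast] at this ⊢
        rw [hsl] at this
        exact this

theorem insertBy_buckets {α : Type} (key : α → Int) (x : α) :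
    ∀ (D : List Int), D.Pairwise (· > ·) → key x ∈ D →
      ∀ (F : Int → List α), (∀ c y, y ∈ F c → key y = c) →
      PySem.List.insertBy (fun a b => decide (key b < key a)) x (List.flatMap F D)
        = List.flatMap (fun c => F c ++ if key x = c then [x] else []) D := by
  intro D
  induction D with
  | nil => intro _ hx; exact absurd hx (List.not_mem_nil)
  | cons c D' ih =>
    intro hpair hx F hF
    have hhead : ∀ c' ∈ D', c > c' := (List.pairwise_cons.mp hpair).1
    have htail : D'.Pairwise (· > ·) := (List.pairwise_cons.mp hpair).2
    rw [List.flatMap_cons, List.flatMap_cons]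
    by_cases hxc : key x = c
    · have h1 : ∀ y ∈ F c, (fun a b => decide (key b < key a)) x y = false := by
        intro y hy
        simp only [decide_eq_false_iff_not]
        rw [hF c y hy, hxc]
        exact lt_irrefl c
      rw [insertBy_append_of_skip _ _ _ _ h1]
      have h2 : ∀ z ∈ List.flatMap F D', (fun a b => decide (key b < key a)) x z = true := by
        intro z hz
        obtain ⟨c', hc', hz'⟩ := List.mem_flatMap.mp hz
        simp only [decide_eq_true_eq]
        rw [hF c' z hz', hxc]
        exact hhead c' hc'
      rw [insertBy_all_before _ _ _ h2]
      have h3 : List.flatMap (fun c' => F c' ++ if key x = c' then [x] else []) D'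
          = List.flatMap F D' := by
        apply flatMap_congr_mem
        intro c' hc'
        rw [if_neg, List.append_nil]
        intro hh
        exact absurd (hxc ▸ hh : c = c') (ne_of_gt (hhead c' hc'))
      rw [h3, if_pos hxc]
      simp
    · have hx' : key x ∈ D' := by
        rcases List.mem_cons.mp hx with hh | hh
        · exact absurd hh hxc
        · exact hh
      have hgt : c > key x := hhead (key x) hx'
      have h1 : ∀ y ∈ F c, (fun a b => decide (key b < key a)) x y = false := by
        intro y hy
        simp only [decide_eq_false_iff_not]
        rw [hF c y hy]
        omega
      rw [insertBy_append_of_skip _ _ _ _ h1, ih htail hx' F hF, if_neg (fun hh => hxc hh)]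
      simp

theorem sorted_rev_buckets {α : Type} (key : α → Int) (xs : List α) (D : List Int)
    (hD : D.Pairwise (· > ·)) (hmem : ∀ x ∈ xs, key x ∈ D) :
    PySem.List.sorted xs key true
      = List.flatMap (fun c => xs.filter (fun x => decide (key x = c))) D := by
  induction xs using List.reverseRecOn with
  | nil =>
    have : ∀ c : Int, (List.nil : List α).filter (fun x => decide (key x = c)) = [] := by
      intro c; rfl
    simp [PySem.List.sorted]
  | append_singleton xs x ih =>
    rw [PySem.List.sorted_rev_eq_foldl_insertBy, List.foldl_append, List.foldl_cons, List.foldl_nil,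
        ← PySem.List.sorted_rev_eq_foldl_insertBy,
        ih (fun y hy => hmem y (List.mem_append_left _ hy))]
    rw [insertBy_buckets key x D hD (hmem x (List.mem_append_right _ List.mem_cons_self)) _
        (fun c y hy => of_decide_eq_true (List.mem_filter.mp hy).2)]
    apply flatMap_congr_mem
    intro c _
    rw [List.filter_append]
    by_cases hxc : key x = c
    · simp [hxc]
    · simp [hxc]

theorem pyRange_down (m : Int) (hm : 0 < m) :
    PySem.List.pyRange m 0 (-1) = (List.range m.toNat).map (fun j : Nat => m - (j : Int)) := by
  have hne : ¬ ((-1 : Int) = 0) := by decide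
  have hlt : ¬ ((0 : Int) < -1) := by decide
  unfold PySem.List.pyRange
  rw [if_neg hne, if_neg hlt, if_pos hm]
  have hcount : ((m - 0 + -(-1 : Int) - 1) / -(-1)).toNat = m.toNat := by
    norm_num
  rw [hcount]
  dsimp only
  exact List.map_congr_left (fun a _ => by omega)

theorem counter_nil_items : (PySem.Dict.counter ([] : List (List Char))).items = [] := rfl

theorem solution_eq (tuple : String) : solution tuple = solution_alt tuple := by
  unfold solution solution_alt
  dsimp only
  have h00 : PySem.List.slice tuple.toList (some (0 : Int)) (some (0 : Int)) = [] := by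
    simp [PySem.List.slice, PySem.List.clampIdx]
  have hA0 := foldA tuple.toList tuple.toList [] [] [] (by simp)
  have hB0 := foldB tuple.toList tuple.toList [] [] 0 (by simp) (Nat.zero_le _)
  simp only [List.length_nil, Nat.cast_zero, zero_sub] at hA0 hB0
  rw [h00] at hB0
  simp only [List.filter_nil] at hB0
  rw [hA0, hB0]
  set toks := (pvScan ((PySem.List.pyGet? tuple.toList (-1)).getD ' ') [] [] tuple.toList).1 with htoksdef
  rw [PySem.Dict.foldl_insert_getD_add_one_eq_counter]
  rw [PySem.List.foldl_append_singleton_eq_map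
      (f := fun p : List Char × Int => (PySem.Int.ofChars? p.1).getD 0)]
  rw [List.nil_append]
  by_cases htoks : toks = []
  · rw [htoks, counter_nil_items]
    rw [if_pos rfl]
    rfl
  · have hitems := PySem.Dict.items_counter toks
    obtain ⟨c0, t0, hct⟩ : ∃ c0 t0, toks = c0 :: t0 := by
      cases h : toks with
      | nil => exact absurd h htoks
      | cons a b => exact ⟨a, b, rfl⟩
    have hne : (PySem.Dict.counter toks).items ≠ [] := by
      rw [hitems]
      intro hh
      have hc0 : c0 ∈ PySem.Set.ofList toks := (PySem.Set.mem_ofList toks c0).mpr (by rw [hct]; exact List.mem_cons_self)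
      have := List.mem_map_of_mem (f := fun k => (k, (toks.count k : Int))) hc0
      rw [hh] at this
      exact List.not_mem_nil this
    rw [if_neg hne]
    have hvals : (PySem.Dict.counter toks).values = (PySem.Dict.counter toks).items.map (fun p => p.2) := rfl
    obtain ⟨mp, hmp⟩ : ∃ mp, PySem.List.max? (PySem.Dict.counter toks).values (fun v => v) = some mp := by
      cases hmx : PySem.List.max? (PySem.Dict.counter toks).values (fun v => v) with
      | none =>
        rw [PySem.List.max?_eq_none_iff, hvals] at hmx
        exact absurd (List.map_eq_nil_iff.mp hmx) hne
      | some m => exact ⟨m, rfl⟩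
    rw [hmp]
    simp only [Option.getD_some]
    have hub : ∀ p ∈ (PySem.Dict.counter toks).items, p.2 ≤ mp := by
      intro p hp
      have : p.2 ∈ (PySem.Dict.counter toks).values := by
        rw [hvals]; exact List.mem_map_of_mem hp
      exact PySem.List.max?_isMax hmp p.2 this
    have hlb : ∀ p ∈ (PySem.Dict.counter toks).items, 1 ≤ p.2 := by
      intro p hp
      rw [hitems] at hp
      obtain ⟨k, hk, hpk⟩ := List.mem_map.mp hp
      have hkt : k ∈ toks := (PySem.Set.mem_ofList toks k).mp hk
      have : 0 < toks.count k := List.count_pos_iff.mpr hkt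
      rw [← hpk]
      show (1 : Int) ≤ (toks.count k : Int)
      omega
    have h1mp : 1 ≤ mp := by
      have hmem_mp := PySem.List.max?_mem hmp
      rw [hvals] at hmem_mp
      obtain ⟨p, hp, hpk⟩ := List.mem_map.mp hmem_mp
      rw [← hpk]
      exact hlb p hp
    have hDr := pyRange_down mp (by omega)
    set D := (List.range mp.toNat).map (fun j : Nat => mp - (j : Int)) with hDdef
    have hDpair : D.Pairwise (· > ·) := by
      rw [hDdef, List.pairwise_map]
      refine List.Pairwise.imp ?_ List.pairwise_lt_range
      intro a b hab
      simp only [gt_iff_lt]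
      omega
    have hKeyMem : ∀ p ∈ (PySem.Dict.counter toks).items, p.2 ∈ D := by
      intro p hp
      rw [hDdef, List.mem_map]
      refine ⟨(mp - p.2).toNat, ?_, ?_⟩
      · rw [List.mem_range]
        have := hub p hp
        have := hlb p hp
        omega
      · have := hub p hp
        have := hlb p hp
        omega
    rw [sorted_rev_buckets (fun p => p.2) (PySem.Dict.counter toks).items D hDpair hKeyMem]
    rw [hDr, PySem.List.foldl_append_eq_flatMap, List.nil_append]
    have hbuck : ∀ c : Int,
        (PySem.Dict.getD ((PySem.Dict.counter toks).items.foldl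
            (fun (d : PySem.Dict Int (List Int)) p =>
              d.modify p.2 [] (fun l => l ++ [(PySem.Int.ofChars? p.1).getD 0])) PySem.Dict.empty) c [])
          = ((PySem.Dict.counter toks).items.filter (fun p => p.2 == c)).map
              (fun p => (PySem.Int.ofChars? p.1).getD 0) := by
      intro c
      have hfold : ((PySem.Dict.counter toks).items.foldl
            (fun (d : PySem.Dict Int (List Int)) p =>
              d.modify p.2 [] (fun l => l ++ [(PySem.Int.ofChars? p.1).getD 0])) PySem.Dict.empty)
          = (((PySem.Dict.counter toks).items.map
              (fun p => (p.2, (PySem.Int.ofChars? p.1).getD 0))).foldl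
            (fun (d : PySem.Dict Int (List Int)) q => d.modify q.1 [] (fun l => l ++ [q.2]))
              PySem.Dict.empty) := by
        rw [List.foldl_map]
      rw [hfold]
      rw [PySem.Dict.getD_foldl_modify_append]
      rw [PySem.Dict.getD_empty, List.nil_append]
      rw [List.filter_map, List.map_map]
      rfl
    simp only [hbuck]
    rw [List.map_flatMap]
    apply flatMap_congr_mem
    intro c _
    have hpe : (fun p : List Char × Int => p.2 == c) = (fun p : List Char × Int => decide (p.2 = c)) := by
      funext p
      by_cases h : p.2 = c <;> simp [h]
    rw [hpe]

-- ===== VERDICT (by name: the statement is the Claim_ definition above) =====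
theorem solution_spec : Claim_equal_solution := by
  unfold Claim_equal_solution Spec_solution
  intro tuple _ _
  exact solution_eq tuple
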